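-- pv_equiv track=rewrite | github.com/sgl-project/sglang | python/sglang/multimodal_gen/test/server/component_accuracy.py | _generate_name_candidates
-- ===== SOURCE A (Python) =====
-- from typing import Any, Dict, Iterable, List, Optional, Tuple
--
-- TARGET_PREFIXES = (
--     "module.",
--     "model.",
--     "transformer.",
--     "text_encoder.",
--     "image_encoder.",
--     "encoder.",
--     "decoder.",
-- )
--
-- def _normalize_key(name: str) -> str:
--     return (
--         name.replace("_fsdp_wrapped_module.", "")
--         .replace("_orig_mod.", "")
--         .replace("gamma", "weight")
--         .replace("beta", "bias")
--         .replace("scale", "weight")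
--         .replace("shift", "bias")
--     )
--
-- def _generate_name_candidates(
--     name: str, reverse_mapping: Optional[Dict[str, Tuple[str, Any, Any]]]
-- ) -> List[str]:
--     candidates: List[str] = []
--     clean = _normalize_key(name)
--
--     for cand in (name, clean):
--         if cand not in candidates:
--             candidates.append(cand)
--
--     if reverse_mapping:
--         for key in (name, clean):
--             entry = reverse_mapping.get(key)
--             if entry and entry[0] not in candidates:
--                 candidates.append(entry[0])
--
--     for prefix in TARGET_PREFIXES:
--         if clean.startswith(prefix):
--             stripped = clean[len(prefix) :]
--             if stripped and stripped not in candidates: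
--                 candidates.append(stripped)
--
--     parts = clean.split(".")
--     for i in range(1, len(parts)):
--         cand = ".".join(parts[i:])
--         if cand not in candidates:
--             candidates.append(cand)
--
--     return candidates
-- ===== SOURCE B (Python) =====
-- from typing import Any, Dict, List, Optional, Tuple
--
-- def _normalize_key(name: str) -> str:
--     return (
--         name.replace("_fsdp_wrapped_module.", "")
--         .replace("_orig_mod.", "")
--         .replace("gamma", "weight")
--         .replace("beta", "bias")
--         .replace("scale", "weight")
--         .replace("shift", "bias")
--     )
--
-- def _suffixes(parts: List[str]) -> List[str]:
--     # joins of the proper tails of parts, front to back, built recursively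
--     if len(parts) <= 1:
--         return []
--     rest = _suffixes(parts[1:])
--     first = parts[1] if len(parts) == 2 else parts[1] + "." + rest[0]
--     return [first] + rest
--
-- def _generate_name_candidates(
--     name: str, reverse_mapping: Optional[Dict[str, Tuple[str, Any, Any]]]
-- ) -> List[str]:
--     clean = _normalize_key(name)
--     out = [name, clean]
--     if reverse_mapping:
--         for key in (name, clean):
--             entry = reverse_mapping.get(key)
--             if entry:
--                 out.append(entry[0])
--     # No prefix-stripping stage: every TARGET_PREFIX is "<one dot-free segment>.",
--     # so a stripped candidate is exactly the first dot-suffix produced here and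
--     # first-occurrence dedup absorbs it.
--     out.extend(_suffixes(clean.split(".")))
--     return list(dict.fromkeys(out))
-- ===== Notes on version B (the rewrite author's own statement) =====
-- stated objective: simpler
-- what changed: B deletes A's TARGET_PREFIXES loop entirely (every target prefix is one dot-free segment plus '.', so the stripped candidate always equals the first dot-suffix), generates the dot-suffixes with a recursive helper that extends the previous join instead of A's range loop of repeated '.'.join(parts[i:]) calls, and deduplicates once at the end with dict.fromkeys instead of per-append membership scans.
import Mathlib
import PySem

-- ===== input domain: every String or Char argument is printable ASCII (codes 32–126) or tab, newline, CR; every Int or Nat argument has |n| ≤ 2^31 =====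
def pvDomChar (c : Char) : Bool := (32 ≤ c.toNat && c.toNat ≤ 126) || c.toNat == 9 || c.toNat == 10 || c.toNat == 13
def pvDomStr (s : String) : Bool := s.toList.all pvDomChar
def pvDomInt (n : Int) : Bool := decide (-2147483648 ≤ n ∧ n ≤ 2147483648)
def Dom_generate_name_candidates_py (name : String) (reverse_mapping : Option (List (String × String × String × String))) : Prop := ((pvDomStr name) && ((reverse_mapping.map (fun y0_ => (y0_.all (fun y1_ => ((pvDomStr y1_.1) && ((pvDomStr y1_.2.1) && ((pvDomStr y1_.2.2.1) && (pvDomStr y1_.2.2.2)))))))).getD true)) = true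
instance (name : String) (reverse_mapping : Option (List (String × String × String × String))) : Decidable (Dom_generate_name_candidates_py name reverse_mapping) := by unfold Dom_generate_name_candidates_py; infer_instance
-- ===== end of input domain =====

-- B drops A's TARGET_PREFIXES stage entirely (every prefix is "<dot-free segment>.", so its
-- stripped candidate is exactly the first dot-suffix), builds the dot-suffixes by a recursive
-- helper instead of A's range/join loop, and deduplicates once at the end; objective: simpler.

-- ===== PORT A =====
def pyTargetPrefixes : List String :=
  ["module.", "model.", "transformer.", "text_encoder.", "image_encoder.", "encoder.", "decoder."]

def pyNormalizeKey (name : String) : String :=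
  PySem.Str.replace (PySem.Str.replace (PySem.Str.replace (PySem.Str.replace (PySem.Str.replace
    (PySem.Str.replace name "_fsdp_wrapped_module." "") "_orig_mod." "")
    "gamma" "weight") "beta" "bias") "scale" "weight") "shift" "bias"

def generate_name_candidates_py (name : String) (reverse_mapping : Option (List (String × String × String × String))) : List String :=
  let clean := pyNormalizeKey name
  let candidates : List String :=
    [name, clean].foldl (fun acc cand => if cand ∈ acc then acc else acc ++ [cand]) []
  let candidates :=
    match reverse_mapping with
    | some m =>
      if m.isEmpty then candidates else   -- 'if reverse_mapping:' — an empty dict is falsy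
        [name, clean].foldl (fun acc key =>
          match (PySem.Dict.mk m).get? key with
          | some entry => if entry.1 ∈ acc then acc else acc ++ [entry.1]  -- 'entry and …': a 3-tuple is always truthy
          | none => acc) candidates
    | none => candidates
  let candidates :=
    pyTargetPrefixes.foldl (fun acc pfx =>
      if PySem.Str.startswith clean pfx then
        let stripped := PySem.Str.slice clean (some (PySem.Str.len pfx)) none
        if stripped ≠ "" ∧ stripped ∉ acc then acc ++ [stripped] else acc
      else acc) candidates
  let parts := (PySem.Str.split? clean ".").getD []   -- sep "." ≠ "": split? is always some
  (PySem.List.pyRange 1 (parts.length : Int) 1).foldl (fun acc i =>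
      let cand := PySem.Str.join "." (PySem.List.slice parts (some i) none)
      if cand ∈ acc then acc else acc ++ [cand]) candidates

-- ===== PORT B =====
-- Source B's _suffixes: the joins of the proper tails of parts, front to back, built recursively
def pySuffixes : List String → List String
  | [] => []
  | [_] => []
  | _ :: q :: rs =>
    let rest := pySuffixes (q :: rs)
    let first := if rs.isEmpty then q else q ++ "." ++ rest.head!   -- rest[0]; rest ≠ [] here
    first :: rest

def generate_name_candidates_py_alt (name : String) (reverse_mapping : Option (List (String × String × String × String))) : List String :=
  let clean := pyNormalizeKey name
  let fromMapping : List String :=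
    match reverse_mapping with
    | some m =>
      if m.isEmpty then [] else
        [name, clean].filterMap (fun key => ((PySem.Dict.mk m).get? key).map (fun entry => entry.1))
    | none => []
  PySem.List.dedup ([name, clean] ++ fromMapping
      ++ pySuffixes ((PySem.Str.split? clean ".").getD []))

-- ===== PRECONDITION & SPEC =====
def Spec_generate_name_candidates_py (name : String) (reverse_mapping : Option (List (String × String × String × String))) (out : List String) : Prop := out = generate_name_candidates_py_alt name reverse_mapping
instance (name : String) (reverse_mapping : Option (List (String × String × String × String))) (out : List String) : Decidable (Spec_generate_name_candidates_py name reverse_mapping out) := by unfold Spec_generate_name_candidates_py; infer_instance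

-- ===== CLAIM (what is proved, stated in full; the proofs are below) =====
def Claim_equal_generate_name_candidates_py : Prop := ∀ (name : String) (reverse_mapping : Option (List (String × String × String × String))), Dom_generate_name_candidates_py name reverse_mapping → Spec_generate_name_candidates_py name reverse_mapping (generate_name_candidates_py name reverse_mapping)

-- ===== LEMMAS AND PROOFS =====

-- dict.fromkeys-dedup is exactly the conditional-append fold A performs.
theorem dedup_eq_foldl_condAppend (xs : List String) :
    PySem.List.dedup xs = xs.foldl (fun acc x => if x ∈ acc then acc else acc ++ [x]) [] := by
  simp only [PySem.List.dedup, PySem.Set.ofList, PySem.Set.empty]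
  congr 1
  funext acc x
  simp [PySem.Set.add, PySem.Set.contains]

-- a loop that conditionally appends (g x) when present equals the conditional-append fold over filterMap g
theorem foldl_condAppend_filterMap {α : Type} (g : α → Option String) (l : List α) (acc : List String) :
    l.foldl (fun acc x => match g x with
                          | some y => if y ∈ acc then acc else acc ++ [y]
                          | none => acc) acc
      = (l.filterMap g).foldl (fun acc y => if y ∈ acc then acc else acc ++ [y]) acc := by
  induction l generalizing acc with
  | nil => rfl
  | cons x xs ih =>
    cases hg : g x <;> simp [hg, ih]

-- A's reverse-mapping loop equals the conditional-append fold over B's fromMapping list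
theorem mapping_stage (name clean : String)
    (rm : Option (List (String × String × String × String))) (acc : List String) :
    (match rm with
     | some m =>
       if m.isEmpty then acc else
         [name, clean].foldl (fun acc key =>
           match ((PySem.Dict.mk m).get? key : Option (String × String × String)) with
           | some entry => if entry.1 ∈ acc then acc else acc ++ [entry.1]
           | none => acc) acc
     | none => acc)
    = (match rm with
       | some m =>
         if m.isEmpty then [] else
           [name, clean].filterMap (fun key => ((PySem.Dict.mk m).get? key).map (fun (entry : String × String × String) => entry.1))
       | none => []).foldl (fun acc y => if y ∈ acc then acc else acc ++ [y]) acc := by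
  cases rm with
  | none => rfl
  | some m =>
    by_cases hm : m.isEmpty
    · simp [hm]
    · simp only [hm, if_neg, Bool.false_eq_true, not_false_iff]
      have hbody : (fun (acc : List String) (key : String) =>
          match ((PySem.Dict.mk m).get? key : Option (String × String × String)) with
          | some entry => if entry.1 ∈ acc then acc else acc ++ [entry.1]
          | none => acc)
          = (fun (acc : List String) (key : String) =>
          match ((PySem.Dict.mk m).get? key).map (fun (entry : String × String × String) => entry.1) with
          | some y => if y ∈ acc then acc else acc ++ [y]
          | none => acc) := by
        funext acc key
        cases (PySem.Dict.mk m).get? key <;> rfl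
      rw [hbody, foldl_condAppend_filterMap]

-- A's prefix loop (combined guard) equals the conditional-append fold over its filterMap list
theorem guarded_stage {α : Type} (t : α → Bool) (v : α → String) (l : List α) (acc : List String) :
    l.foldl (fun acc x =>
        if t x then
          if v x ≠ "" ∧ v x ∉ acc then acc ++ [v x] else acc
        else acc) acc
    = (l.filterMap (fun x =>
        if t x then (if v x ≠ "" then some (v x) else none) else none)).foldl
        (fun acc y => if y ∈ acc then acc else acc ++ [y]) acc := by
  rw [← foldl_condAppend_filterMap]
  congr 1
  funext acc x
  cases ht : t x
  · simp
  · by_cases he : v x = ""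
    · simp [he]
    · simp only [he, ne_eq, not_false_iff, true_and, reduceIte]
      split_ifs <;> simp_all

-- ---- split on "." characterised by a plain structural recursion ----
def splitDot : List Char → List (List Char)
  | [] => [[]]
  | c :: cs =>
    if c = '.' then [] :: splitDot cs
    else
      match splitDot cs with
      | [] => [[c]]          -- unreachable: splitDot is never []
      | h :: t => (c :: h) :: t

theorem splitDot_ne_nil (l : List Char) : splitDot l ≠ [] := by
  cases l with
  | nil => simp [splitDot]
  | cons c cs =>
    simp only [splitDot]
    split
    · simp
    · split <;> simp

theorem splitOn_go_step (f : Nat) (c : Char) (rest cur : List Char) (acc : List (List Char)) :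
    PySem.Chars.splitOn.go ['.'] (f+1) (c :: rest) cur acc
      = if c = '.' then PySem.Chars.splitOn.go ['.'] f rest [] (cur.reverse :: acc)
        else PySem.Chars.splitOn.go ['.'] f rest (c :: cur) acc := by
  simp only [PySem.Chars.splitOn.go, List.isPrefixOf]
  by_cases hc : c = '.'
  · simp [hc]
  · simp only [hc]
    rw [if_neg (by simp; exact fun h => absurd h.symm hc)]
    simp

theorem splitOn_go_eq (l : List Char) : ∀ (fuel : Nat) (cur : List Char) (acc : List (List Char)),
    l.length ≤ fuel →
    PySem.Chars.splitOn.go ['.'] fuel l cur acc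
      = acc.reverse ++ (cur.reverse ++ (splitDot l).headI) :: (splitDot l).tail := by
  induction l with
  | nil =>
    intro fuel cur acc _
    cases fuel <;> simp [PySem.Chars.splitOn.go, splitDot]
  | cons c cs ih =>
    intro fuel cur acc h
    cases fuel with
    | zero => simp at h
    | succ f =>
      rw [splitOn_go_step]
      by_cases hc : c = '.'
      · rw [if_pos hc]
        rw [ih f [] (cur.reverse :: acc) (by simpa using h)]
        subst hc
        simp only [splitDot]
        rcases hs : splitDot cs with _ | ⟨h1, t1⟩
        · exact absurd hs (splitDot_ne_nil cs)
        · simp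
      · rw [if_neg hc]
        rw [ih f (c :: cur) acc (by simpa using h)]
        rcases hs : splitDot cs with _ | ⟨h1, t1⟩
        · exact absurd hs (splitDot_ne_nil cs)
        · simp [splitDot, hc, hs]

theorem splitOn_eq_splitDot (l : List Char) :
    PySem.Chars.splitOn l ['.'] = splitDot l := by
  rw [PySem.Chars.splitOn, splitOn_go_eq l (l.length + 1) [] [] (by omega)]
  rcases hs : splitDot l with _ | ⟨h1, t1⟩
  · exact absurd hs (splitDot_ne_nil l)
  · simp

theorem splitDot_join (l : List Char) : List.intercalate ['.'] (splitDot l) = l := by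
  induction l with
  | nil => simp [splitDot, List.intercalate]
  | cons c cs ih =>
    by_cases hc : c = '.'
    · subst hc
      simp only [splitDot]
      rcases hs : splitDot cs with _ | ⟨h1, t1⟩
      · exact absurd hs (splitDot_ne_nil cs)
      · rw [hs] at ih
        simp only [List.intercalate] at *
        simp [List.flatten] at *
        simp [ih]
    · simp only [splitDot, if_neg hc]
      rcases hs : splitDot cs with _ | ⟨h1, t1⟩
      · exact absurd hs (splitDot_ne_nil cs)
      · rw [hs] at ih
        cases t1 with
        | nil => simpa [List.intercalate] using congrArg (c :: ·) ih
        | cons x xs =>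
          simp only [List.intercalate, List.intersperse_cons₂] at *
          simp [List.flatten] at *
          simp [ih]

theorem splitDot_prepend (t r : List Char) (ht : '.' ∉ t) :
    splitDot (t ++ '.' :: r) = t :: splitDot r := by
  induction t with
  | nil => simp [splitDot]
  | cons c t' ih =>
    have hc : c ≠ '.' := by intro h; exact ht (by simp [h])
    have ih' := ih (by intro h; exact ht (by simp [h]))
    simp only [List.cons_append, splitDot, if_neg hc, ih']

-- ---- Source B's recursive _suffixes computes the joins of the proper tails ----
theorem strJoin_cons₂ (q r : String) (rs : List String) :
    PySem.Str.join "." (q :: r :: rs) = q ++ "." ++ PySem.Str.join "." (r :: rs) := by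
  apply String.toList_inj.mp
  simp [PySem.Str.join, PySem.Chars.join, List.intercalate, List.intersperse_cons₂]

theorem strJoin_singleton (q : String) : PySem.Str.join "." [q] = q := by
  apply String.toList_inj.mp
  simp [PySem.Str.join, PySem.Chars.join, List.intercalate]

theorem pySuffixes_cons₂ (a b : String) (l : List String) :
    pySuffixes (a :: b :: l) = PySem.Str.join "." (b :: l) :: pySuffixes (b :: l) := by
  induction l generalizing a b with
  | nil => simp [pySuffixes, strJoin_singleton]
  | cons r rs ih =>
    have hd : pySuffixes (a :: b :: r :: rs)
        = (b ++ "." ++ (pySuffixes (b :: r :: rs)).head!) :: pySuffixes (b :: r :: rs) := by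
      rw [pySuffixes]
      simp
    rw [hd, ih b r]
    simp [strJoin_cons₂]

theorem suffixes_eq (parts : List String) :
    (List.range (parts.length - 1)).map (fun k => PySem.Str.join "." (parts.drop (k + 1)))
      = pySuffixes parts := by
  match parts with
  | [] => simp [pySuffixes]
  | [p] => simp [pySuffixes]
  | p :: q :: rs =>
    rw [pySuffixes_cons₂]
    have h1 : (p :: q :: rs).length - 1 = rs.length + 1 := by simp
    rw [h1, List.range_succ_eq_map, List.map_cons, List.map_map]
    have ih := suffixes_eq (q :: rs)
    have h2 : (q :: rs).length - 1 = rs.length := by simp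
    rw [h2] at ih
    simp only [List.drop_succ_cons, List.drop_zero]
    rw [← ih]
    congr 1

theorem pyRange_one_eq (n : Nat) :
    PySem.List.pyRange 1 ((n : Int) + 1) 1 = (List.range n).map (fun (k : Nat) => ((k : Int) + 1)) := by
  induction n with
  | zero => rfl
  | succ m ih =>
    rw [show ((m + 1 : Nat) : Int) + 1 = ((m : Int) + 1) + 1 by push_cast; ring]
    rw [PySem.List.pyRange_one_succ_right (by omega), List.range_succ]
    simp [ih]

theorem suffix_list_eq (parts : List String) :
    (PySem.List.pyRange 1 (parts.length : Int) 1).map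
        (fun i => PySem.Str.join "." (PySem.List.slice parts (some i) none))
      = pySuffixes parts := by
  cases parts with
  | nil => rfl
  | cons p ps =>
    rw [show (((p :: ps).length : Nat) : Int) = ((ps.length : Nat) : Int) + 1 by simp]
    rw [pyRange_one_eq, List.map_map, ← suffixes_eq (p :: ps)]
    have h1 : (p :: ps).length - 1 = ps.length := by simp
    rw [h1]
    apply List.map_congr_left
    intro k _
    simp only [Function.comp_apply]
    rw [show ((k : Int) + 1) = ((k + 1 : Nat) : Int) by push_cast; ring,
        PySem.List.slice_from_natCast]

-- A's suffix loop equals the conditional-append fold over B's pySuffixes list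
theorem suffix_stage (parts : List String) (acc : List String) :
    (PySem.List.pyRange 1 (parts.length : Int) 1).foldl (fun acc i =>
        let cand := PySem.Str.join "." (PySem.List.slice parts (some i) none)
        if cand ∈ acc then acc else acc ++ [cand]) acc
      = (pySuffixes parts).foldl (fun acc y => if y ∈ acc then acc else acc ++ [y]) acc := by
  rw [← suffix_list_eq parts, List.foldl_map]

-- elements that sit at the head of the tail list are absorbed by first-occurrence dedup
theorem foldl_condAppend_absorb (w v : List String) (acc : List String)
    (h : ∀ x ∈ w, ∃ r, v = x :: r) :
    v.foldl (fun acc y => if y ∈ acc then acc else acc ++ [y])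
        (w.foldl (fun acc y => if y ∈ acc then acc else acc ++ [y]) acc)
      = v.foldl (fun acc y => if y ∈ acc then acc else acc ++ [y]) acc := by
  induction w generalizing acc with
  | nil => simp
  | cons x xs ih =>
    obtain ⟨r, hr⟩ := h x (by simp)
    rw [List.foldl_cons, ih _ (fun y hy => h y (List.mem_cons_of_mem x hy))]
    rw [hr, List.foldl_cons, List.foldl_cons]
    congr 1
    by_cases hx : x ∈ acc
    · simp [hx]
    · simp [hx]

-- clean = t ++ "." ++ r with '.' ∉ t  ⟹  the stripped candidate heads the suffix list
theorem key_head (clean : String) (t r : List Char) (ht : '.' ∉ t)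
    (hc : clean.toList = t ++ '.' :: r) :
    ∃ rest, pySuffixes ((PySem.Str.split? clean ".").getD [])
      = PySem.Str.slice clean (some (((t.length + 1 : Nat) : Int))) none :: rest := by
  have hparts : (PySem.Str.split? clean ".").getD []
      = String.ofList t :: (splitDot r).map String.ofList := by
    simp only [PySem.Str.split?, PySem.Chars.split?]
    rw [show ".".toList = ['.'] from rfl]
    simp only [List.isEmpty_cons, Bool.false_eq_true, ite_false, Option.map_some,
      Option.getD_some]
    rw [hc, splitOn_eq_splitDot, splitDot_prepend t r ht]
    simp
  rcases hs : splitDot r with _ | ⟨h1, t1⟩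
  · exact absurd hs (splitDot_ne_nil r)
  rw [hparts, hs]
  simp only [List.map_cons]
  rw [pySuffixes_cons₂]
  have hhead : PySem.Str.join "." (String.ofList h1 :: List.map String.ofList t1)
      = PySem.Str.slice clean (some (((t.length + 1 : Nat) : Int))) none := by
    apply String.toList_inj.mp
    rw [PySem.Str.toList_join, PySem.Str.toList_slice]
    rw [show ".".toList = ['.'] from rfl]
    simp only [PySem.Chars.slice_eq_listSlice, PySem.List.slice_from_natCast]
    rw [hc]
    have hdrop : List.drop (t.length + 1) (t ++ '.' :: r) = r := by
      rw [show t ++ '.' :: r = (t ++ ['.']) ++ r by simp,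
          show t.length + 1 = (t ++ ['.']).length by simp, List.drop_left]
    rw [hdrop]
    simp only [PySem.Chars.join]
    rw [List.map_cons, List.map_map]
    have hmm : (List.map (String.toList ∘ String.ofList) t1) = t1 := by
      simp [Function.comp_def]
    rw [String.toList_ofList, hmm, ← hs, splitDot_join]
  exact ⟨_, by rw [hhead]⟩

theorem prefix_case (clean p x : String) (t : List Char)
    (hp : p.toList = t ++ ['.']) (ht : '.' ∉ t)
    (hsw : PySem.Str.startswith clean p = true)
    (hx : x = PySem.Str.slice clean (some (PySem.Str.len p)) none) :
    ∃ rest, pySuffixes ((PySem.Str.split? clean ".").getD []) = x :: rest := by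
  obtain ⟨r, hr⟩ := (PySem.Chars.startswith_iff clean.toList p.toList).mp hsw
  have hc : clean.toList = t ++ '.' :: r := by
    rw [← hr, hp]; simp
  have hlen : PySem.Str.len p = ((t.length + 1 : Nat) : Int) := by
    rw [PySem.Str.len_eq, hp]; simp
  rw [hx, hlen]
  exact key_head clean t r ht hc

-- every candidate A's prefix stage produces is the head of the suffix list
theorem prefix_mem (clean : String) :
    ∀ x ∈ pyTargetPrefixes.filterMap (fun pfx =>
        if PySem.Str.startswith clean pfx then
          (if PySem.Str.slice clean (some (PySem.Str.len pfx)) none ≠ "" then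
            some (PySem.Str.slice clean (some (PySem.Str.len pfx)) none) else none)
        else none),
      ∃ r, pySuffixes ((PySem.Str.split? clean ".").getD []) = x :: r := by
  intro x hx
  rw [List.mem_filterMap] at hx
  obtain ⟨pfx, hmem, hif⟩ := hx
  have hx' : PySem.Str.startswith clean pfx = true
      ∧ x = PySem.Str.slice clean (some (PySem.Str.len pfx)) none := by
    split_ifs at hif with h1 h2
    injection hif with hv
    exact ⟨h1, hv.symm⟩
  obtain ⟨hsw, hxe⟩ := hx'
  fin_cases hmem
  · exact prefix_case clean "module." x ['m','o','d','u','l','e'] (by decide) (by decide) hsw hxe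
  · exact prefix_case clean "model." x ['m','o','d','e','l'] (by decide) (by decide) hsw hxe
  · exact prefix_case clean "transformer." x ['t','r','a','n','s','f','o','r','m','e','r'] (by decide) (by decide) hsw hxe
  · exact prefix_case clean "text_encoder." x ['t','e','x','t','_','e','n','c','o','d','e','r'] (by decide) (by decide) hsw hxe
  · exact prefix_case clean "image_encoder." x ['i','m','a','g','e','_','e','n','c','o','d','e','r'] (by decide) (by decide) hsw hxe
  · exact prefix_case clean "encoder." x ['e','n','c','o','d','e','r'] (by decide) (by decide) hsw hxe
  · exact prefix_case clean "decoder." x ['d','e','c','o','d','e','r'] (by decide) (by decide) hsw hxe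

-- ===== VERDICT (by name: the statement is the Claim_ definition above) =====
theorem generate_name_candidates_py_spec : Claim_equal_generate_name_candidates_py := by
  intro name reverse_mapping _
  unfold Spec_generate_name_candidates_py generate_name_candidates_py generate_name_candidates_py_alt
  simp only []
  generalize pyNormalizeKey name = clean
  rw [dedup_eq_foldl_condAppend, List.foldl_append, List.foldl_append]
  rw [suffix_stage]
  rw [guarded_stage (fun pfx => PySem.Str.startswith clean pfx)
        (fun pfx => PySem.Str.slice clean (some (PySem.Str.len pfx)) none)]
  rw [mapping_stage name clean reverse_mapping]
  exact foldl_condAppend_absorb _ _ _ (prefix_mem clean)
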